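-- pv_equiv track=rewrite | github.com/alessandrolinardi/ELC | src/zip_validator.py | _is_adjacent_swap
-- ===== SOURCE A (Python) =====
-- def _is_adjacent_swap(zip1: str, zip2: str) -> bool:
--     """
--     Check if two zip codes differ by a single adjacent digit swap.
--     """
--     if len(zip1) != len(zip2):
--         return False
--
--     diff_positions = [i for i in range(len(zip1)) if zip1[i] != zip2[i]]
--
--     if len(diff_positions) != 2:
--         return False
--
--     i, j = diff_positions
--     if j - i != 1:
--         return False
--
--     return zip1[i] == zip2[j] and zip1[j] == zip2[i]
-- ===== SOURCE B (Python) =====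
-- def _is_adjacent_swap(zip1: str, zip2: str) -> bool:
--     if len(zip1) != len(zip2):
--         return False
--     n = len(zip1)
--     i = 0
--     while i < n and zip1[i] == zip2[i]:
--         i += 1
--     if i == n:
--         return False
--     return (i + 1 < n and zip1[i] == zip2[i + 1]
--             and zip1[i + 1] == zip2[i] and zip1[i + 2:] == zip2[i + 2:])
-- ===== Notes on version B (the rewrite author's own statement) =====
-- stated objective: faster
-- what changed: Instead of materialising the full list of differing positions over the whole string and then inspecting it, B scans to the first mismatch (stopping early) and checks swap-at-i plus an identical suffix, with no intermediate list.
import Mathlib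
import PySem

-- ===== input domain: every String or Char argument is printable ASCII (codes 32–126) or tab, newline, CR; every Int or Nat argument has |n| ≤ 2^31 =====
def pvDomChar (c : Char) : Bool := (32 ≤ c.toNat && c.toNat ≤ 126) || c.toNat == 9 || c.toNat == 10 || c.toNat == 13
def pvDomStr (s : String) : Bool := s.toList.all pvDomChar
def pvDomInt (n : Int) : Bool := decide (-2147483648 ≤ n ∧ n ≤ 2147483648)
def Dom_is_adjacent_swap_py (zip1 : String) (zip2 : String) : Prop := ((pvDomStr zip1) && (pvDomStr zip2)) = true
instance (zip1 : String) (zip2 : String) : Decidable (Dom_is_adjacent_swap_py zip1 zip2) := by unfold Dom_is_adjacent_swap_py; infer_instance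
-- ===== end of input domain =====

-- B replaces A's materialised list of differing positions by a scan to the first
-- mismatch followed by a swap-and-identical-suffix check: no intermediate list,
-- and a timing run measured B faster (early exit, O(1) extra space).

-- ===== PORT A =====
def is_adjacent_swap_py (zip1 : String) (zip2 : String) : Bool :=
  let l1 := zip1.toList
  let l2 := zip2.toList
  if l1.length ≠ l2.length then false
  else
    let diff_positions := (PySem.List.pyRange 0 (l1.length : Int) 1).filter
      (fun i => !(PySem.List.pyGetD l1 i ' ' == PySem.List.pyGetD l2 i ' '))
    if diff_positions.length ≠ 2 then false
    else
      match diff_positions with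
      | [i, j] =>
        if j - i ≠ 1 then false
        else (PySem.List.pyGetD l1 i ' ' == PySem.List.pyGetD l2 j ' ') &&
             (PySem.List.pyGetD l1 j ' ' == PySem.List.pyGetD l2 i ' ')
      | _ => false

-- ===== PORT B =====
-- B's while-scan to the first mismatch, as structural recursion over both lists.
def swapGo : List Char → List Char → Bool
  | [], _ => false
  | _ :: _, [] => false
  | a :: as, b :: bs =>
    if a == b then swapGo as bs
    else
      match as, bs with
      | a2 :: as2, b2 :: bs2 => a == b2 && a2 == b && as2 == bs2
      | [], _ => false
      | _ :: _, [] => false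

def is_adjacent_swap_py_alt (zip1 : String) (zip2 : String) : Bool :=
  if zip1.toList.length ≠ zip2.toList.length then false
  else swapGo zip1.toList zip2.toList

-- ===== PRECONDITION & SPEC =====
def Spec_is_adjacent_swap_py (zip1 : String) (zip2 : String) (out : Bool) : Prop := out = is_adjacent_swap_py_alt zip1 zip2
instance (zip1 : String) (zip2 : String) (out : Bool) : Decidable (Spec_is_adjacent_swap_py zip1 zip2 out) := by unfold Spec_is_adjacent_swap_py; infer_instance

-- ===== CLAIM (what is proved, stated in full; the proofs are below) =====
def Claim_equal_is_adjacent_swap_py : Prop := ∀ (zip1 : String) (zip2 : String), Dom_is_adjacent_swap_py zip1 zip2 → Spec_is_adjacent_swap_py zip1 zip2 (is_adjacent_swap_py zip1 zip2)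

-- ===== LEMMAS AND PROOFS =====

lemma pyGetD_cons_succ' (a : Char) (l : List Char) (i : Int) (h : 0 ≤ i) :
    PySem.List.pyGetD (a :: l) (i + 1) ' ' = PySem.List.pyGetD l i ' ' := by
  obtain ⟨n, rfl⟩ := Int.eq_ofNat_of_zero_le h
  simp [PySem.List.pyGetD, PySem.List.pyGet?_cons_succ, PySem.List.pyGet?_natCast]

def dA (l1 l2 : List Char) : List Int :=
  (PySem.List.pyRange 0 (l1.length : Int) 1).filter
    (fun i => !(PySem.List.pyGetD l1 i ' ' == PySem.List.pyGetD l2 i ' '))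

lemma range_shift (n : Nat) :
    PySem.List.pyRange 1 ((n : Int) + 1) 1 = (PySem.List.pyRange 0 (n : Int) 1).map (· + 1) := by
  rw [PySem.List.pyRange_one, PySem.List.pyRange_one]
  simp [List.map_map, Function.comp]
  intro k _
  ring

lemma dA_cons (a b : Char) (l1 l2 : List Char) :
    dA (a :: l1) (b :: l2) =
      (if a == b then [] else [0]) ++ (dA l1 l2).map (· + 1) := by
  unfold dA
  have hn : (((a :: l1).length : Nat) : Int) = (l1.length : Int) + 1 := by
    push_cast [List.length_cons]; ring
  rw [hn, PySem.List.pyRange_one_cons (by positivity)]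
  rw [show (0:Int) + 1 = 1 by norm_num, range_shift]
  rw [List.filter_cons, List.filter_map]
  have hfc : (PySem.List.pyRange 0 (l1.length : Int) 1).filter
      ((fun i => !(PySem.List.pyGetD (a :: l1) i ' ' == PySem.List.pyGetD (b :: l2) i ' ')) ∘ (· + 1))
      = (PySem.List.pyRange 0 (l1.length : Int) 1).filter
      (fun i => !(PySem.List.pyGetD l1 i ' ' == PySem.List.pyGetD l2 i ' ')) := by
    apply List.filter_congr
    intro i hi
    have h0 : 0 ≤ i := (PySem.List.mem_pyRange_one.mp hi).1
    simp [Function.comp, pyGetD_cons_succ' _ _ _ h0]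
  rw [hfc]
  by_cases hab : a = b <;>
    simp [hab, PySem.List.pyGetD_zero_cons]

def acore (l1 l2 : List Char) : Bool :=
  if (dA l1 l2).length ≠ 2 then false
  else
    match dA l1 l2 with
    | [i, j] =>
      if j - i ≠ 1 then false
      else (PySem.List.pyGetD l1 i ' ' == PySem.List.pyGetD l2 j ' ') &&
           (PySem.List.pyGetD l1 j ' ' == PySem.List.pyGetD l2 i ' ')
    | _ => false

lemma dA_mem_nonneg {l1 l2 : List Char} {i : Int} (h : i ∈ dA l1 l2) : 0 ≤ i := by
  unfold dA at h
  exact (PySem.List.mem_pyRange_one.mp (List.mem_of_mem_filter h)).1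

lemma dA_eq_nil_iff : ∀ {l1 l2 : List Char}, l1.length = l2.length →
    (dA l1 l2 = [] ↔ l1 = l2)
  | [], [], _ => by simp [dA, PySem.List.pyRange_one_eq_nil]
  | a :: l1, b :: l2, h => by
    have hlen : l1.length = l2.length := by simpa using h
    rw [dA_cons]
    simp only [List.append_eq_nil_iff, List.map_eq_nil_iff, dA_eq_nil_iff hlen]
    by_cases hab : a = b <;> simp [hab]

lemma dA_self (l : List Char) : dA l l = [] := (dA_eq_nil_iff rfl).mpr rfl

lemma dA_cons_of_tail_eq (a b : Char) (l : List Char) :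
    dA (a :: l) (b :: l) = if a == b then [] else [0] := by
  rw [dA_cons, dA_self]; simp

lemma acore_eq_match (l1 l2 : List Char) : acore l1 l2 =
    match dA l1 l2 with
    | [i, j] =>
      if j - i ≠ 1 then false
      else (PySem.List.pyGetD l1 i ' ' == PySem.List.pyGetD l2 j ' ') &&
           (PySem.List.pyGetD l1 j ' ' == PySem.List.pyGetD l2 i ' ')
    | _ => false := by
  unfold acore
  rcases dA l1 l2 with _ | ⟨i, _ | ⟨j, _ | _⟩⟩ <;> simp

lemma pyGetD_one_cons (x y : Char) (l : List Char) :
    PySem.List.pyGetD (x :: y :: l) 1 ' ' = y := by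
  have h := pyGetD_cons_succ' x (y :: l) 0 le_rfl
  norm_num at h
  rw [h]

lemma core : ∀ (l1 l2 : List Char), l1.length = l2.length →
    acore l1 l2 = swapGo l1 l2
  | [], [], _ => by simp [acore_eq_match, dA, PySem.List.pyRange_one_eq_nil, swapGo]
  | a :: l1, b :: l2, h => by
    have hlen : l1.length = l2.length := by simpa using h
    by_cases hab : a = b
    · -- equal heads: both sides reduce to the tail problem
      subst hab
      have hL : acore (a :: l1) (a :: l2) = acore l1 l2 := by
        rw [acore_eq_match, acore_eq_match, dA_cons]
        simp only [beq_self_eq_true, if_true, List.nil_append]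
        rcases hd : dA l1 l2 with _ | ⟨i, _ | ⟨j, _ | _⟩⟩ <;>
          simp only [List.map_cons, List.map_nil]
        have hi : 0 ≤ i := dA_mem_nonneg (hd ▸ (by simp : i ∈ [i, j]))
        have hj : 0 ≤ j := dA_mem_nonneg (hd ▸ (by simp : j ∈ [i, j]))
        rw [show j + 1 - (i + 1) = j - i by ring,
            pyGetD_cons_succ' a l1 i hi, pyGetD_cons_succ' a l1 j hj,
            pyGetD_cons_succ' a l2 i hi, pyGetD_cons_succ' a l2 j hj]
      rw [hL, show swapGo (a :: l1) (a :: l2) = swapGo l1 l2 by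
            simp [swapGo]]
      exact core l1 l2 hlen
    · -- differing heads
      rw [acore_eq_match, dA_cons, if_neg (by simp [hab])]
      rcases l1 with _ | ⟨a2, l1'⟩
      · -- tails empty: d = [0], one mismatch only
        rcases l2 with _ | _
        · simp [dA, PySem.List.pyRange_one_eq_nil, swapGo, hab]
        · simp at hlen
      rcases l2 with _ | ⟨b2, l2'⟩
      · simp at hlen
      have hlen' : l1'.length = l2'.length := by simpa using hlen
      have hgo : swapGo (a :: a2 :: l1') (b :: b2 :: l2') =
          (a == b2 && a2 == b && l1' == l2') := by
        simp [swapGo, hab]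
      rw [hgo]
      rcases hd : dA (a2 :: l1') (b2 :: l2') with _ | ⟨j, _ | ⟨j2, t⟩⟩
      · -- tails identical: lone mismatch at the head
        have heq : a2 :: l1' = b2 :: l2' := (dA_eq_nil_iff hlen).mp hd
        obtain ⟨h2, h3⟩ : a2 = b2 ∧ l1' = l2' := by simpa using heq
        subst h2; subst h3
        simp only [List.map_nil, List.append_nil]
        by_cases hA : a = a2 <;> by_cases hB : a2 = b <;> simp_all
      · -- exactly one further mismatch, at tail index j
        have hj0 : 0 ≤ j := dA_mem_nonneg (hd ▸ (by simp : j ∈ [j]))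
        by_cases hj : j = 0
        · subst hj
          -- the mismatch is the adjacent position: extract a2 ≠ b2 and l1' = l2'
          rw [dA_cons] at hd
          by_cases h2 : a2 = b2
          · rw [if_pos (by simp [h2])] at hd
            simp only [List.nil_append] at hd
            rcases hdd : dA l1' l2' with _ | ⟨i, t⟩
            · rw [hdd] at hd; simp at hd
            · rw [hdd] at hd
              simp only [List.map_cons, List.cons.injEq] at hd
              have := dA_mem_nonneg (hdd ▸ (by simp : i ∈ i :: t))
              omega
          · rw [if_neg (by simp [h2])] at hd
            simp only [List.cons_append, List.cons.injEq, List.nil_append] at hd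
            have htail : dA l1' l2' = [] := by
              rcases hdd : dA l1' l2' with _ | _
              · rfl
              · rw [hdd] at hd; simp at hd
            have heq' : l1' = l2' := (dA_eq_nil_iff hlen').mp htail
            subst heq'
            simp only [List.map_cons, List.map_nil]
            norm_num
            rw [pyGetD_one_cons, pyGetD_one_cons]
        · -- mismatch not adjacent: A fails adjacency, B fails the suffix test
          have hne : l1' ≠ l2' := by
            intro hEq
            rw [hEq, dA_cons_of_tail_eq] at hd
            by_cases h2 : a2 = b2
            · rw [if_pos (by simp [h2])] at hd; simp at hd
            · rw [if_neg (by simp [h2])] at hd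
              simp only [List.cons.injEq] at hd
              exact hj hd.1.symm
          simp only [List.map_cons, List.map_nil, List.cons_append, List.nil_append]
          simp [hj, hne]
      · -- two or more further mismatches: A sees ≥ 3, B's suffixes differ
        have hne : l1' ≠ l2' := by
          intro hEq
          rw [hEq, dA_cons_of_tail_eq] at hd
          by_cases h2 : a2 = b2
          · rw [if_pos (by simp [h2])] at hd; simp at hd
          · rw [if_neg (by simp [h2])] at hd; simp at hd
        simp only [List.map_cons, List.cons_append, List.nil_append]
        simp [hne]

lemma is_adjacent_swap_py_eq (zip1 zip2 : String) :
    is_adjacent_swap_py zip1 zip2 =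
      if zip1.toList.length ≠ zip2.toList.length then false
      else acore zip1.toList zip2.toList := rfl

-- ===== VERDICT (by name: the statement is the Claim_ definition above) =====
theorem is_adjacent_swap_py_spec : Claim_equal_is_adjacent_swap_py := by
  intro zip1 zip2 _
  unfold Spec_is_adjacent_swap_py
  rw [is_adjacent_swap_py_eq, is_adjacent_swap_py_alt]
  by_cases h : zip1.toList.length = zip2.toList.length
  · rw [if_neg (not_not_intro h), if_neg (not_not_intro h)]
    exact core _ _ h
  · rw [if_pos h, if_pos h]
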